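-- pv_equiv track=rewrite | github.com/ellenmellon/DIALKI | prepro/create_dialdoc_json.py | _get_spid2type
-- ===== SOURCE A (Python) =====
-- def _get_spid2type(doc):
--     spid2type = {}
--     cur_type = 1
--     prev_id_sec = None
--     for i, sp_id in enumerate(doc["spans"]):
--         id_sec = doc["spans"][sp_id]["id_sec"]
--         if prev_id_sec and id_sec != prev_id_sec:
--             cur_type = 1 - cur_type
--         spid2type[sp_id] = cur_type
--         prev_id_sec = id_sec
--
--     return spid2type
-- ===== SOURCE B (Python) =====
-- def _get_spid2type(doc):
--     spans = doc["spans"]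
--     pairs = [(sp, spans[sp]["id_sec"]) for sp in spans]
--     spid2type = {}
--     cur_type = 1
--     prev = None
--     i, n = 0, len(pairs)
--     while i < n:
--         sec = pairs[i][1]
--         j = i + 1
--         while j < n and pairs[j][1] == sec:
--             j += 1
--         if prev and sec != prev:
--             cur_type = 1 - cur_type
--         for sp, _ in pairs[i:j]:
--             spid2type[sp] = cur_type
--         prev = sec
--         i = j
--     return spid2type
-- ===== Notes on version B (the rewrite author's own statement) =====
-- stated objective: alternative
-- what changed: Replaces A's single pass with a per-element comparison against the previous section by a run-based nested pass: an outer while-loop finds each maximal run of consecutive spans with equal section, toggles the type once per run (keeping the truthiness gate on the previous section), and an inner loop assigns the type to the whole run.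
import Mathlib
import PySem

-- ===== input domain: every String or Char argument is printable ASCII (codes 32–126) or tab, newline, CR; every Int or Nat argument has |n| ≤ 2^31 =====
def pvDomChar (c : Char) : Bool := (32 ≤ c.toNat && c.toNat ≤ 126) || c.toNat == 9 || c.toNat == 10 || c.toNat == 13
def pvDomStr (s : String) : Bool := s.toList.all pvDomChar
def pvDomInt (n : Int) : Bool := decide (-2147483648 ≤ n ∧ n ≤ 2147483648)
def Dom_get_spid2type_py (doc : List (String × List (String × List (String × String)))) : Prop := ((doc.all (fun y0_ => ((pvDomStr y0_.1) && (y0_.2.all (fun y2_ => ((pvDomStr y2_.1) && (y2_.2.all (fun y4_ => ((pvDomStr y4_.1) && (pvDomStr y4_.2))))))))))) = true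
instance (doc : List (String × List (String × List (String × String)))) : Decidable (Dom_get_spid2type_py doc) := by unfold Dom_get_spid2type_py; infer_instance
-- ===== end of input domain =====

-- B replaces A's per-element previous-section comparison by an explicit run-based nested pass
-- (outer loop over maximal runs of equal section, inner loop assigning the run's type); objective: alternative.

-- ===== PORT A =====
-- shared accessor: doc["spans"] (as an insertion-ordered dict) and span["id_sec"] with "" standing
-- for the KeyError case that Pre_ excludes
def pvSpans (doc : List (String × List (String × List (String × String)))) :
    PySem.Dict String (List (String × String)) :=
  PySem.Dict.ofList (((PySem.Dict.ofList doc).get? "spans").getD [])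

def pvSecOf (spans : PySem.Dict String (List (String × String))) (sp : String) : String :=
  ((PySem.Dict.ofList (spans.getD sp [])).get? "id_sec").getD ""

-- Python truthiness gate `prev_id_sec and id_sec != prev_id_sec`
def pvGate (prev : Option String) (id_sec : String) : Bool :=
  match prev with
  | none => false
  | some p => p != "" && id_sec != p

def get_spid2type_py (doc : List (String × List (String × List (String × String)))) : List (String × Int) :=
  let spans := pvSpans doc
  let st := spans.keys.foldl
    (fun (st : PySem.Dict String Int × Int × Option String) sp_id =>
      let id_sec := pvSecOf spans sp_id
      let cur_type := if pvGate st.2.2 id_sec then 1 - st.2.1 else st.2.1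
      (st.1.insert sp_id cur_type, cur_type, some id_sec))
    (PySem.Dict.empty, 1, none)
  st.1.items

-- ===== PORT B =====
-- outer while-loop over maximal runs of equal section (pairs[i:j]), inner loop assigns the type
def altLoop : List (String × String) → PySem.Dict String Int → Int → Option String → PySem.Dict String Int
  | [], d, _, _ => d
  | (sp, sec) :: rest, d, cur, prev =>
      let run := (sp, sec) :: rest.takeWhile (fun q => q.2 == sec)
      let rest' := rest.dropWhile (fun q => q.2 == sec)
      let cur' := if pvGate prev sec then 1 - cur else cur
      altLoop rest' (run.foldl (fun d q => d.insert q.1 cur') d) cur' (some sec)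
  termination_by l _ _ _ => l.length
  decreasing_by
    simp only [List.length_cons]
    exact Nat.lt_succ_of_le (List.length_dropWhile_le _ _)

def get_spid2type_py_alt (doc : List (String × List (String × List (String × String)))) : List (String × Int) :=
  let spans := pvSpans doc
  let pairs := spans.keys.map (fun sp => (sp, pvSecOf spans sp))
  (altLoop pairs PySem.Dict.empty 1 none).items

-- ===== PRECONDITION & SPEC =====
-- Pre_ excludes exactly the KeyError inputs: a doc without a "spans" key, or a span (surviving
-- dict construction) without an "id_sec" key — on those A raises KeyError.
def Pre_get_spid2type_py (doc : List (String × List (String × List (String × String)))) : Prop :=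
  (PySem.Dict.ofList doc).contains "spans" = true ∧
  ∀ p ∈ (pvSpans doc).items, (PySem.Dict.ofList p.2).contains "id_sec" = true
instance (doc : List (String × List (String × List (String × String)))) : Decidable (Pre_get_spid2type_py doc) := by unfold Pre_get_spid2type_py; infer_instance

def pvWitness_get_spid2type_py : (List (String × List (String × List (String × String)))) :=
  [("spans", [("s0", [("id_sec", "A")]), ("s1", [("id_sec", "A")]), ("s2", [("id_sec", "B")])])]

def Spec_get_spid2type_py (doc : List (String × List (String × List (String × String)))) (out : List (String × Int)) : Prop := out = get_spid2type_py_alt doc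
instance (doc : List (String × List (String × List (String × String)))) (out : List (String × Int)) : Decidable (Spec_get_spid2type_py doc out) := by unfold Spec_get_spid2type_py; infer_instance

-- ===== CLAIM (what is proved, stated in full; the proofs are below) =====
def Claim_equal_get_spid2type_py : Prop := ∀ (doc : List (String × List (String × List (String × String)))), Dom_get_spid2type_py doc → Pre_get_spid2type_py doc → Spec_get_spid2type_py doc (get_spid2type_py doc)

-- ===== LEMMAS AND PROOFS =====

-- A's loop step, on a precomputed (span id, section) pair
def aStep (st : PySem.Dict String Int × Int × Option String) (p : String × String) :
    PySem.Dict String Int × Int × Option String :=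
  let cur_type := if pvGate st.2.2 p.2 then 1 - st.2.1 else st.2.1
  (st.1.insert p.1 cur_type, cur_type, some p.2)

-- within a run (every section equal to the one just seen) the gate never fires
lemma foldl_aStep_run (t : List (String × String)) (sec : String)
    (h : ∀ q ∈ t, q.2 = sec) (d : PySem.Dict String Int) (c : Int) :
    t.foldl aStep (d, c, some sec) =
      (t.foldl (fun d q => d.insert q.1 c) d, c, some sec) := by
  induction t generalizing d with
  | nil => rfl
  | cons q t ih =>
      have hq : q.2 = sec := h q (by simp)
      have : aStep (d, c, some sec) q = (d.insert q.1 c, c, some sec) := by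
        simp [aStep, pvGate, hq]
      simp only [List.foldl_cons, this]
      exact ih (fun q hmem => h q (by simp [hmem])) _

lemma foldl_aStep_eq_altLoop (l : List (String × String)) (d : PySem.Dict String Int)
    (c : Int) (prev : Option String) :
    (l.foldl aStep (d, c, prev)).1 = altLoop l d c prev := by
  induction l, d, c, prev using altLoop.induct with
  | case1 d c prev => rw [altLoop]; rfl
  | case2 sp sec rest d c prev run rest' cur' ih =>
      rw [altLoop]
      have hsplit : rest = rest.takeWhile (fun q => q.2 == sec) ++ rest' :=
        (List.takeWhile_append_dropWhile).symm
      have hhead : aStep (d, c, prev) (sp, sec) = (d.insert sp cur', cur', some sec) := by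
        simp [aStep, cur']
      have hrun : ∀ q ∈ rest.takeWhile (fun q => q.2 == sec), q.2 = sec := by
        intro q hq
        have := List.mem_takeWhile_imp hq
        simpa using this
      calc ((( sp, sec) :: rest).foldl aStep (d, c, prev)).1
          = ((rest.takeWhile (fun q => q.2 == sec) ++ rest').foldl aStep
              (d.insert sp cur', cur', some sec)).1 := by
            rw [List.foldl_cons, hhead, ← hsplit]
        _ = (rest'.foldl aStep
              ((rest.takeWhile (fun q => q.2 == sec)).foldl (fun d q => d.insert q.1 cur')
                (d.insert sp cur'), cur', some sec)).1 := by
            rw [List.foldl_append, foldl_aStep_run _ sec hrun]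
        _ = altLoop rest' (run.foldl (fun d q => d.insert q.1 cur') d) cur' (some sec) := by
            rw [← ih]; rfl

-- ===== VERDICT (by name: the statement is the Claim_ definition above) =====
theorem get_spid2type_py_spec : Claim_equal_get_spid2type_py := by
  intro doc _ _
  unfold Spec_get_spid2type_py get_spid2type_py get_spid2type_py_alt
  have h := foldl_aStep_eq_altLoop ((pvSpans doc).keys.map (fun sp => (sp, pvSecOf (pvSpans doc) sp)))
      PySem.Dict.empty 1 none
  rw [List.foldl_map] at h
  simp only [← h]
  rfl
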